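-- pv_equiv track=rewrite | github.com/LILILIHANG/leetleetcocode | leecode/猿辅导提前批笔试_数箱子.py | longest
-- ===== SOURCE A (Python) =====
-- def longest(s: str):
--     if not s:#输入为空
--         return 0
--     stack = []
--     dep=0#记录深度，即现在所在的外层有多少括号
--     depth=[]#记录每层深度的和，即每层括号里面的和
--     for i in range(len(s)):
--         if s[i] == '[':#遇到左括号深度+1
--             stack.append(i)
--             dep+=1
--             depth.append(0)
--         else:
--             if i<len(s)-1 and s[i] == ']' and s[i+1] in '[]':#遇到右括号，深度-1，且右括号后没有数字，则可以直接当前深度箱子数量可直接加1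
--                 stack.pop()
--                 dep-=1
--                 depth[dep]+=1
--             elif i==len(s)-1 and s[i] == ']':#考虑边界情况，深度-1，当前深度箱子数量加1
--                 stack.pop()
--                 dep -= 1
--                 depth[dep] += 1
--             elif s[i] == ']' and s[i+1] not in '[]':#遇到右括号，深度-1，右括号后有数字，则当前深度箱子数量可直接加num，且当前深度+1到最大深度每个深度都需要乘num
--                 num=int(s[i+1])
--                 dep -= 1
--                 depth[dep] += num
--                 for i in range(dep+1,len(depth)):
--                     depth[i]=num*depth[i]
--     return sum(depth)#每个深度箱子数量，即每个型号箱子个数相加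
-- ===== SOURCE B (Python) =====
-- def longest(s: str):
--     # One right-to-left pass: per-level lazy multipliers instead of rescaling a suffix
--     # of the depth array at every numbered close (O(n) instead of O(n^2)).
--     total = 0          # running answer
--     f = 1              # product of multipliers (seen so far) that apply below the current level
--     lam = 0            # level, counted from the right end of the string
--     h = {}             # h[level] = product of multipliers attached at that level so far
--     fs = []            # stack of f-values for the levels below the current one
--     nxt = None         # the character to the right of the current one
--     for c in reversed(s):
--         if c == '[':
--             f = fs.pop() if fs else 1
--             lam -= 1
--         elif c == ']':
--             fs.append(f)
--             f *= h.get(lam, 1)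
--             lam += 1
--             if nxt is None or nxt in '[]':
--                 total += f
--             else:
--                 num = int(nxt)
--                 total += num * f
--                 h[lam] = h.get(lam, 1) * num
--         nxt = c
--     return total
-- ===== Notes on version B (the rewrite author's own statement) =====
-- stated objective: faster
-- what changed: Instead of A's depth array that is rescaled over its whole suffix at every numbered close (O(n^2)), B makes one right-to-left pass keeping lazy per-level multiplier products (a dict) and a stack of pending factor products, adding each close's contribution to a running total in O(1).
-- outside the precondition, e.g. on longest('[]2]2'): A returns 8, B returns 6; on longest(']'): A raises IndexError, B returns 1
import Mathlib
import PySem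

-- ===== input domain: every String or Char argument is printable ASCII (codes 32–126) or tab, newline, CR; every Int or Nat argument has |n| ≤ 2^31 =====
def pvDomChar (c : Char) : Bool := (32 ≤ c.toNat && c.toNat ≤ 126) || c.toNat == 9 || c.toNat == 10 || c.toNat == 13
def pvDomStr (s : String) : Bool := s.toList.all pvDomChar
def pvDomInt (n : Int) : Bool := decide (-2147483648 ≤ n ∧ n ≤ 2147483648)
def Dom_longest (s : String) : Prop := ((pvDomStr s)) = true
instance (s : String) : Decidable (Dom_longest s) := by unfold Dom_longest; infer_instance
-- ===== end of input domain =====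

-- B replaces A's O(n^2) rescan (multiplying the whole suffix of the depth array at every
-- numbered close) by a single right-to-left pass with per-level lazy multiplicative factors.

-- ===== PORT A =====
-- one step of A's "for i in range(len(s))" loop; state = (stack, dep, depth)
def longestStepA (l : List Char) (n : Int) (st : List Int × Int × List Int) (i : Int) :
    List Int × Int × List Int :=
  let (stack, dep, depth) := st
  match PySem.List.pyGet? l i with
  | none => st        -- unreachable: i ∈ range(len(l))
  | some c =>
    if c = '[' then (stack ++ [i], dep + 1, depth ++ [0])
    else
      let nxt := PySem.List.pyGet? l (i + 1)
      if i < n - 1 ∧ c = ']' ∧ (nxt = some '[' ∨ nxt = some ']') then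
        (stack.dropLast, dep - 1,
         PySem.List.pySetD depth (dep - 1) (PySem.List.pyGetD depth (dep - 1) 0 + 1))
      else if i = n - 1 ∧ c = ']' then
        (stack.dropLast, dep - 1,
         PySem.List.pySetD depth (dep - 1) (PySem.List.pyGetD depth (dep - 1) 0 + 1))
      else if c = ']' ∧ ¬(nxt = some '[' ∨ nxt = some ']') then
        let num := (PySem.Int.ofStr? (String.mk [nxt.getD ' '])).getD 0
        let dep2 := dep - 1
        let depth1 := PySem.List.pySetD depth dep2 (PySem.List.pyGetD depth dep2 0 + num)
        let depth2 := (PySem.List.pyRange (dep2 + 1) depth1.length 1).foldl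
          (fun d j => PySem.List.pySetD d j (num * PySem.List.pyGetD d j 0)) depth1
        (stack, dep2, depth2)
      else st

def longest (s : String) : Int :=
  let l := s.toList
  if l = [] then 0
  else
    let n : Int := l.length
    let fin := (PySem.List.pyRange 0 n 1).foldl (longestStepA l n) ([], 0, [])
    fin.2.2.sum

-- ===== PORT B =====
-- one step of B's "for c in reversed(s)" loop;
-- state = (total, f, lam, h, fs, nxt): running answer, product of multipliers applying
-- below the current level, level counted from the right, per-level multiplier dict,
-- stack of f-values of the levels below, and the character to the right.
def longestStepB (st : Int × Int × Int × PySem.Dict Int Int × List Int × Option Char)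
    (c : Char) : Int × Int × Int × PySem.Dict Int Int × List Int × Option Char :=
  let (total, f, lam, h, fs, nxt) := st
  if c = '[' then
    match fs with
    | f' :: rest => (total, f', lam - 1, h, rest, some c)
    | [] => (total, 1, lam - 1, h, [], some c)
  else if c = ']' then
    let fs' := f :: fs
    let f' := f * h.getD lam 1
    let lam' := lam + 1
    match nxt with
    | none => (total + f', f', lam', h, fs', some c)
    | some d =>
      if d = '[' ∨ d = ']' then (total + f', f', lam', h, fs', some c)
      else
        let num := (PySem.Int.ofStr? (String.mk [d])).getD 0
        (total + num * f', f', lam', h.insert lam' (h.getD lam' 1 * num), fs', some c)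
  else (total, f, lam, h, fs, some c)

def longest_alt (s : String) : Int :=
  (s.toList.reverse.foldl longestStepB (0, 1, 0, PySem.Dict.empty, [], none)).1

-- ===== PRECONDITION & SPEC =====
-- Pre_ excludes (a) strings where some ']' has no matching '[' still open before it — there
-- A raises IndexError from stack.pop(), or, when the ']' is followed by a digit, returns an
-- accidental value via Python negative-index wraparound into the depth array — and
-- (b) strings where a ']' is followed by a non-bracket non-digit character, on which
-- A raises ValueError from int().
def Pre_longest (s : String) : Prop :=
  ∀ i ∈ List.range s.toList.length,
    s.toList.getD i ' ' = ']' →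
      ((s.toList.take i).count ']' < (s.toList.take i).count '[' ∧
       (i + 1 < s.toList.length →
         ¬(s.toList.getD (i + 1) ' ' = '[' ∨ s.toList.getD (i + 1) ' ' = ']') →
         (s.toList.getD (i + 1) ' ').isDigit))
instance (s : String) : Decidable (Pre_longest s) := by unfold Pre_longest; infer_instance

def pvWitness_longest : String := "[[]2]3"

def Spec_longest (s : String) (out : Int) : Prop := out = longest_alt s
instance (s : String) (out : Int) : Decidable (Spec_longest s out) := by unfold Spec_longest; infer_instance

-- ===== CLAIM (what is proved, stated in full; the proofs are below) =====
def Claim_equal_longest : Prop := ∀ (s : String), Dom_longest s → Pre_longest s → Spec_longest s (longest s)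

-- ===== LEMMAS AND PROOFS =====

-- ']'-minus-'[' balance of a character list (the level of the list's left end, seen from the right)
def balR : List Char → Int
  | [] => 0
  | c :: cs => (if c = ']' then 1 else if c = '[' then -1 else 0) + balR cs

-- multiplier attached to the token (c, next char), if any
def multOf (c : Char) (nx : Option Char) : Option Int :=
  if c = ']' then
    match nx with
    | some d => if d = '[' ∨ d = ']' then none
                else some ((PySem.Int.ofStr? (String.mk [d])).getD 0)
    | none => none
  else none

-- increment produced by the token (c, next char): 1 for a bare close, num for a numbered one
def incOf (_c : Char) (nx : Option Char) : Int :=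
  match nx with
  | some d => if d = '[' ∨ d = ']' then 1
              else (PySem.Int.ofStr? (String.mk [d])).getD 0
  | none => 1

-- product of the multipliers in cs attached at levels (seen from the right end) < b
def mprod (b : Int) : List Char → Int
  | [] => 1
  | c :: cs =>
    (match multOf c cs.head? with
     | some k => if balR (c :: cs) < b then k else 1
     | none => 1) * mprod b cs

-- product of the multipliers in cs attached at level exactly lv
def lprod (lv : Int) : List Char → Int
  | [] => 1
  | c :: cs =>
    (match multOf c cs.head? with
     | some k => if balR (c :: cs) = lv then k else 1
     | none => 1) * lprod lv cs

-- the common mathematical value: sum over every ']' of its increment times the product of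
-- the multipliers strictly to its right attached at strictly lower levels
def res : List Char → Int
  | [] => 0
  | c :: cs => (if c = ']' then incOf c cs.head? * mprod (balR cs + 1) cs else 0) + res cs

-- weighted sum of a depth array: entry at offset i weighs mprod (b + i) cs
def wsum (d : List Int) (b : Int) (cs : List Char) : Int :=
  match d with
  | [] => 0
  | x :: xs => x * mprod b cs + wsum xs (b + 1) cs

-- A's loop, abstractly: recursion over the characters carrying (dep, depth)
def arec : Int × List Int → List Char → Int × List Int
  | st, [] => st
  | (dep, depth), c :: cs =>
    arec
      (if c = '[' then (dep + 1, depth ++ [0])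
       else if c = ']' ∧ (cs.head? = some '[' ∨ cs.head? = some ']' ∨ cs.head? = none) then
         (dep - 1, depth.set (dep - 1).toNat (depth.getD (dep - 1).toNat 0 + 1))
       else if c = ']' then
         let num := incOf c cs.head?
         let d1 := depth.set (dep - 1).toNat (depth.getD (dep - 1).toNat 0 + num)
         (dep - 1, d1.take dep.toNat ++ (d1.drop dep.toNat).map (fun x => num * x))
       else (dep, depth)) cs

-- depth-underflow-freedom of A's loop, relative to a starting depth
def preT (dep : Int) : List Char → Prop
  | [] => True
  | c :: cs =>
    if c = '[' then preT (dep + 1) cs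
    else if c = ']' then 1 ≤ dep ∧ preT (dep - 1) cs
    else preT dep cs

-- ---- to be proven ----

theorem mprod_succ (b : Int) (cs : List Char) :
    mprod (b + 1) cs = lprod b cs * mprod b cs := by
  induction cs with
  | nil => simp [mprod, lprod]
  | cons c cs ih =>
    simp only [mprod, lprod, ih]
    cases h : multOf c cs.head? with
    | none => ring
    | some k =>
      by_cases h1 : balR (c :: cs) = b
      · have h2 : balR (c :: cs) < b + 1 := by omega
        have h3 : ¬ balR (c :: cs) < b := by omega
        simp only [if_pos h1, if_pos h2, if_neg h3]; ring
      · by_cases h2 : balR (c :: cs) < b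
        · have h3 : balR (c :: cs) < b + 1 := by omega
          simp only [if_neg h1, if_pos h2, if_pos h3]; ring
        · have h3 : ¬ balR (c :: cs) < b + 1 := by omega
          simp only [if_neg h1, if_neg h2, if_neg h3]; ring

theorem wsum_mult_all (c : Char) (cs : List Char) (k : Int)
    (hk : multOf c cs.head? = some k) :
    ∀ (d : List Int) (b : Int), balR (c :: cs) < b →
      wsum d b (c :: cs) = k * wsum d b cs := by
  intro d
  induction d with
  | nil => intro b _; simp [wsum]
  | cons x xs ih =>
    intro b hb
    have hb' : balR (c :: cs) < b + 1 := by omega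
    simp only [wsum, mprod, hk, if_pos hb, ih (b + 1) hb']
    ring

theorem wsum_mult (c : Char) (cs : List Char) (k : Int)
    (hk : multOf c cs.head? = some k) :
    ∀ (t : Nat) (d : List Int) (b : Int), b + t = balR (c :: cs) + 1 →
      wsum d b (c :: cs) = wsum (d.take t) b cs + k * wsum (d.drop t) (b + t) cs := by
  intro t
  induction t with
  | zero =>
    intro d b hb
    have hlt : balR (c :: cs) < b := by push_cast at hb; omega
    simp only [List.take_zero, List.drop_zero, wsum, Nat.cast_zero, add_zero]
    rw [wsum_mult_all c cs k hk d b hlt]; ring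
  | succ t ih =>
    intro d b hb
    cases d with
    | nil => simp [wsum]
    | cons x xs =>
      have hnlt : ¬ balR (c :: cs) < b := by push_cast at hb ⊢; omega
      have hb' : (b + 1) + (t : Int) = balR (c :: cs) + 1 := by push_cast at hb ⊢; omega
      have harg : b + ((t : Nat) + 1 : Nat) = (b + 1) + (t : Int) := by push_cast; ring
      simp only [wsum, mprod, hk, if_neg hnlt, List.take_succ_cons, List.drop_succ_cons,
        ih xs (b + 1) hb', harg]
      ring

theorem wsum_nomult (c : Char) (cs : List Char)
    (hk : multOf c cs.head? = none) :
    ∀ (d : List Int) (b : Int), wsum d b (c :: cs) = wsum d b cs := by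
  intro d
  induction d with
  | nil => intro b; simp [wsum]
  | cons x xs ih => intro b; simp only [wsum, mprod, hk, ih (b + 1)]; ring

theorem wsum_append (u v : List Int) (b : Int) (cs : List Char) :
    wsum (u ++ v) b cs = wsum u b cs + wsum v (b + u.length) cs := by
  induction u generalizing b with
  | nil => simp [wsum]
  | cons x u ih =>
    have harg : b + ((x :: u).length : Int) = (b + 1) + (u.length : Int) := by
      push_cast [List.length_cons]; ring
    simp only [List.cons_append, wsum, ih (b + 1), harg]
    ring

theorem wsum_map_mul (d : List Int) (k b : Int) (cs : List Char) :
    wsum (d.map (fun x => k * x)) b cs = k * wsum d b cs := by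
  induction d generalizing b with
  | nil => simp [wsum]
  | cons x xs ih => simp only [List.map_cons, wsum, ih (b + 1)]; ring

theorem wsum_set (d : List Int) (r : Nat) (x b : Int) (cs : List Char) (hr : r < d.length) :
    wsum (d.set r x) b cs = wsum d b cs + (x - d.getD r 0) * mprod (b + r) cs := by
  induction d generalizing r b with
  | nil => simp at hr
  | cons a xs ih =>
    cases r with
    | zero => simp only [List.set_cons_zero, wsum, List.getD_cons_zero, Nat.cast_zero, add_zero]; ring
    | succ r =>
      have hr' : r < xs.length := by simpa using hr
      have harg : b + ((r : Nat) + 1 : Nat) = (b + 1) + (r : Int) := by push_cast; ring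
      simp only [List.set_cons_succ, wsum, List.getD_cons_succ, ih r (b + 1) hr', harg]
      ring


-- small step lemmas about the spec functions
theorem multOf_none_of_ne (c : Char) (nx : Option Char) (h : ¬ c = ']') : multOf c nx = none := by
  simp [multOf, h]

theorem mprod_cons_none (c : Char) (cs : List Char) (b : Int)
    (h : multOf c cs.head? = none) : mprod b (c :: cs) = mprod b cs := by
  simp [mprod, h]

theorem mprod_cons_some_nlt (c : Char) (cs : List Char) (b k : Int)
    (h : multOf c cs.head? = some k) (hb : ¬ balR (c :: cs) < b) :
    mprod b (c :: cs) = mprod b cs := by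
  simp [mprod, h, hb]

theorem lprod_cons_none (c : Char) (cs : List Char) (μ : Int)
    (h : multOf c cs.head? = none) : lprod μ (c :: cs) = lprod μ cs := by
  simp [lprod, h]

theorem lprod_cons_some (c : Char) (cs : List Char) (μ k : Int)
    (h : multOf c cs.head? = some k) :
    lprod μ (c :: cs) = (if balR (c :: cs) = μ then k else 1) * lprod μ cs := by
  simp [lprod, h]

theorem res_cons_not (c : Char) (cs : List Char) (h : ¬ c = ']') : res (c :: cs) = res cs := by
  simp [res, h]

theorem res_cons_rb (cs : List Char) :
    res (']' :: cs) = incOf ']' cs.head? * mprod (balR cs + 1) cs + res cs := by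
  simp [res]

theorem balR_cons_lb (cs : List Char) : balR ('[' :: cs) = -1 + balR cs := by simp [balR]
theorem balR_cons_rb (cs : List Char) : balR (']' :: cs) = 1 + balR cs := by simp [balR]
theorem balR_cons_other (c : Char) (cs : List Char) (h1 : ¬ c = '[') (h2 : ¬ c = ']') :
    balR (c :: cs) = balR cs := by simp [balR, h1, h2]

theorem wsum_self (d : List Int) : ∀ b : Int, wsum d b [] = d.sum := by
  induction d with
  | nil => intro b; simp [wsum]
  | cons x xs ih => intro b; simp [wsum, mprod, ih (b + 1)]

-- the main A-side invariant
theorem arec_sum (cs : List Char) :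
    ∀ (dep : Int) (depth : List Int), preT dep cs → 0 ≤ dep → dep ≤ depth.length →
      (arec (dep, depth) cs).2.sum = wsum depth (balR cs + 1 - dep) cs + res cs := by
  induction cs with
  | nil =>
    intro dep depth _ _ _
    simp only [arec, res, balR]
    rw [wsum_self depth (0 + 1 - dep)]
    ring
  | cons c cs ih =>
    intro dep depth hpre hd0 hdl
    by_cases h1 : c = '['
    · subst h1
      have hpre' : preT (dep + 1) cs := by
        simpa only [preT, reduceIte] using hpre
      have hstep : arec (dep, depth) ('[' :: cs) = arec (dep + 1, depth ++ [0]) cs := by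
        simp [arec]
      rw [hstep, ih (dep + 1) (depth ++ [0]) hpre' (by omega) (by simp; omega)]
      have hm : multOf '[' cs.head? = none := multOf_none_of_ne _ _ (by decide)
      have e1 : balR cs + 1 - (dep + 1) = balR ('[' :: cs) + 1 - dep := by
        rw [balR_cons_lb]; ring
      rw [wsum_append, res_cons_not _ _ (by decide),
          wsum_nomult '[' cs hm depth (balR ('[' :: cs) + 1 - dep), ← e1]
      simp [wsum]
    · by_cases h2 : c = ']'
      · subst h2
        have hpre' : (1 ≤ dep) ∧ preT (dep - 1) cs := by
          simpa only [preT, reduceIte] using hpre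
        have hr : (dep - 1).toNat < depth.length := by omega
        have hrc : ((dep - 1).toNat : Int) = dep - 1 := by omega
        rcases hcs : cs.head? with _ | d
        · -- last character
          have hstep : arec (dep, depth) (']' :: cs)
              = arec (dep - 1, depth.set (dep - 1).toNat (depth.getD (dep - 1).toNat 0 + 1)) cs := by
            simp [arec, hcs]
          rw [hstep, ih _ _ hpre'.2 (by omega) (by simp; omega)]
          have hm : multOf ']' cs.head? = none := by rw [hcs]; rfl
          rw [wsum_set depth _ _ _ cs hr, res_cons_rb,
              wsum_nomult ']' cs hm depth (balR (']' :: cs) + 1 - dep)]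
          have e1 : balR cs + 1 - (dep - 1) = balR (']' :: cs) + 1 - dep := by
            rw [balR_cons_rb]; ring
          have e2 : balR cs + 1 - (dep - 1) + ((dep - 1).toNat : Int) = balR cs + 1 := by omega
          have e3 : incOf ']' cs.head? = 1 := by rw [hcs]; rfl
          rw [e2, e1, e3]
          ring
        · by_cases hd : d = '[' ∨ d = ']'
          · -- bare close
            have hstep : arec (dep, depth) (']' :: cs)
                = arec (dep - 1, depth.set (dep - 1).toNat (depth.getD (dep - 1).toNat 0 + 1)) cs := by
              rcases hd with hd | hd <;> subst hd <;> simp [arec, hcs]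
            rw [hstep, ih _ _ hpre'.2 (by omega) (by simp; omega)]
            have hm : multOf ']' cs.head? = none := by
              rw [hcs]; rcases hd with hd | hd <;> subst hd <;> rfl
            rw [wsum_set depth _ _ _ cs hr, res_cons_rb,
                wsum_nomult ']' cs hm depth (balR (']' :: cs) + 1 - dep)]
            have e1 : balR cs + 1 - (dep - 1) = balR (']' :: cs) + 1 - dep := by
              rw [balR_cons_rb]; ring
            have e2 : balR cs + 1 - (dep - 1) + ((dep - 1).toNat : Int) = balR cs + 1 := by omega
            have e3 : incOf ']' cs.head? = 1 := by
              rw [hcs]; rcases hd with hd | hd <;> subst hd <;> rfl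
            rw [e2, e1, e3]
            ring
          · -- numbered close
            have hd1 : ¬ d = '[' := fun hh => hd (Or.inl hh)
            have hd2 : ¬ d = ']' := fun hh => hd (Or.inr hh)
            set num := incOf ']' cs.head? with hnum
            have hmult : multOf ']' cs.head? = some num := by
              rw [hnum, hcs]
              simp [multOf, incOf, hd1, hd2]
            set d1 := depth.set (dep - 1).toNat (depth.getD (dep - 1).toNat 0 + num) with hd1e
            have hld1 : d1.length = depth.length := by rw [hd1e]; simp
            have hstep : arec (dep, depth) (']' :: cs)
                = arec (dep - 1, d1.take dep.toNat ++ (d1.drop dep.toNat).map (fun x => num * x)) cs := by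
              have hnum' : incOf ']' (some d) = num := by rw [hnum, hcs]
              simp [arec, hcs, hd1, hd2, hnum', hd1e]
            have hlen2 : dep - 1 ≤ ((d1.take dep.toNat ++ (d1.drop dep.toNat).map (fun x => num * x)).length : Int) := by
              simp [hld1]; omega
            rw [hstep, ih _ _ hpre'.2 (by omega) hlen2]
            have hmin : (d1.take dep.toNat).length = dep.toNat := by
              simp [hld1]; omega
            have e0 : balR cs + 1 - (dep - 1) + ((d1.take dep.toNat).length : Int)
                = balR (']' :: cs) + 1 := by
              rw [hmin, balR_cons_rb]; omega
            rw [wsum_append, wsum_map_mul, e0]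
            have e1 : (balR (']' :: cs) + 1) = (balR cs + 1 - (dep - 1)) + (dep.toNat : Int) := by
              rw [balR_cons_rb]; omega
            have hws := wsum_mult ']' cs num hmult dep.toNat d1 (balR cs + 1 - (dep - 1)) e1.symm
            rw [← e1] at hws
            rw [← hws]
            have hws2 := wsum_set depth (dep - 1).toNat (depth.getD (dep - 1).toNat 0 + num)
              (balR cs + 1 - (dep - 1)) (']' :: cs) hr
            rw [← hd1e] at hws2
            rw [hws2]
            have e2 : balR cs + 1 - (dep - 1) + ((dep - 1).toNat : Int) = balR cs + 1 := by omega
            rw [e2]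
            have e3 : balR cs + 1 - (dep - 1) = balR (']' :: cs) + 1 - dep := by
              rw [balR_cons_rb]; ring
            have hm2 : mprod (balR cs + 1) (']' :: cs) = mprod (balR cs + 1) cs :=
              mprod_cons_some_nlt ']' cs _ num hmult (by rw [balR_cons_rb]; omega)
            rw [res_cons_rb, hm2, e3]
            ring
      · -- other character
        have hpre' : preT dep cs := by
          simpa only [preT, if_neg h1, if_neg h2] using hpre
        have hstep : arec (dep, depth) (c :: cs) = arec (dep, depth) cs := by
          simp only [arec, if_neg h1]
          rw [if_neg (by intro hcon; exact h2 hcon.1), if_neg (by intro hcon; exact h2 hcon)]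
        rw [hstep, ih _ _ hpre' hd0 hdl]
        have hm : multOf c cs.head? = none := multOf_none_of_ne _ _ h2
        rw [res_cons_not _ _ h2, wsum_nomult c cs hm depth (balR (c :: cs) + 1 - dep),
            balR_cons_other c cs h1 h2]

-- B's loop as structural recursion from the right
def brec : List Char → Int × Int × Int × PySem.Dict Int Int × List Int × Option Char
  | [] => (0, 1, 0, PySem.Dict.empty, [], none)
  | c :: cs => longestStepB (brec cs) c

theorem foldl_reverse_brec (l : List Char) :
    l.reverse.foldl longestStepB (0, 1, 0, PySem.Dict.empty, [], none) = brec l := by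
  induction l with
  | nil => rfl
  | cons c cs ih => simp [List.reverse_cons, List.foldl_append, ih, brec]

-- the main B-side invariant
theorem brec_inv (l : List Char) :
    (brec l).1 = res l ∧
    (brec l).2.1 = mprod (balR l) l ∧
    (brec l).2.2.1 = balR l ∧
    (∀ μ : Int, ((brec l).2.2.2.1).getD μ 1 = lprod μ l) ∧
    (∀ j : Nat, ((brec l).2.2.2.2.1).getD j 1 = mprod (balR l - 1 - j) l) ∧
    (brec l).2.2.2.2.2 = l.head? := by
  induction l with
  | nil =>
    refine ⟨rfl, rfl, rfl, ?_, ?_, rfl⟩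
    · intro μ
      show PySem.Dict.empty.getD μ 1 = lprod μ []
      rw [PySem.Dict.getD_empty]; rfl
    · intro j
      show ([] : List Int).getD j 1 = mprod (balR [] - 1 - (j : Int)) []
      rfl
  | cons c cs ih =>
    obtain ⟨h1, h2, h3, h4, h5, h6⟩ := ih
    rcases hst : brec cs with ⟨total, f, lam, hh, fs, nxt⟩
    rw [hst] at h1 h2 h3 h4 h5 h6
    dsimp only at h1 h2 h3 h4 h5 h6
    have hbr : brec (c :: cs) = longestStepB (total, f, lam, hh, fs, nxt) c := by
      rw [brec, hst]
    subst h6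
    by_cases hc1 : c = '['
    · subst hc1
      have hm : multOf '[' cs.head? = none := multOf_none_of_ne _ _ (by decide)
      have hres : res ('[' :: cs) = res cs := res_cons_not _ _ (by decide)
      cases fs with
      | nil =>
        rw [hbr]
        simp only [longestStepB, reduceIte]
        refine ⟨h1.trans hres.symm, ?_, ?_, ?_, ?_, rfl⟩
        · have h50 := h5 0
          simp only [List.getD] at h50
          rw [mprod_cons_none _ _ _ hm, balR_cons_lb]
          rw [show (-1 : Int) + balR cs = balR cs - 1 - ((0 : Nat) : Int) by push_cast; ring]
          exact h50
        · rw [h3, balR_cons_lb]; ring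
        · intro μ; rw [h4 μ, lprod_cons_none _ _ _ hm]
        · intro j
          have h5j := h5 (j + 1)
          simp only [List.getD] at h5j ⊢
          rw [mprod_cons_none _ _ _ hm, balR_cons_lb]
          rw [show (-1 : Int) + balR cs - 1 - (j : Int) = balR cs - 1 - ((j + 1 : Nat) : Int) by push_cast; ring]
          exact h5j
      | cons f0 rest =>
        rw [hbr]
        simp only [longestStepB, reduceIte]
        refine ⟨h1.trans hres.symm, ?_, ?_, ?_, ?_, rfl⟩
        · have h50 := h5 0
          rw [List.getD_cons_zero] at h50
          rw [mprod_cons_none _ _ _ hm, balR_cons_lb]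
          rw [show (-1 : Int) + balR cs = balR cs - 1 - ((0 : Nat) : Int) by push_cast; ring]
          exact h50
        · rw [h3, balR_cons_lb]; ring
        · intro μ; rw [h4 μ, lprod_cons_none _ _ _ hm]
        · intro j
          have h5j := h5 (j + 1)
          rw [List.getD_cons_succ] at h5j
          rw [mprod_cons_none _ _ _ hm, balR_cons_lb]
          rw [show (-1 : Int) + balR cs - 1 - (j : Int) = balR cs - 1 - ((j + 1 : Nat) : Int) by push_cast; ring]
          exact h5j
    · by_cases hc2 : c = ']'
      · subst hc2
        have hf' : f * hh.getD lam 1 = mprod (balR cs + 1) cs := by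
          rw [h2, h3, h4 (balR cs), mprod_succ]; ring
        rcases hcs : cs.head? with _ | d
        · -- rightmost character
          have hm : multOf ']' cs.head? = none := by rw [hcs]; rfl
          have hinc : incOf ']' cs.head? = 1 := by rw [hcs]; rfl
          rw [hbr]
          simp only [longestStepB, if_neg hc1, if_true, hcs]
          refine ⟨?_, ?_, ?_, ?_, ?_, rfl⟩
          · rw [res_cons_rb, hinc, h1, hf']; ring
          · rw [mprod_cons_none _ _ _ hm, balR_cons_rb, hf',
                show balR cs + 1 = 1 + balR cs by ring]
          · rw [h3, balR_cons_rb]; ring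
          · intro μ; rw [h4 μ, lprod_cons_none _ _ _ hm]
          · intro j
            cases j with
            | zero =>
              rw [List.getD_cons_zero, mprod_cons_none _ _ _ hm, balR_cons_rb, h2]
              rw [show (1 : Int) + balR cs - 1 - ((0 : Nat) : Int) = balR cs by push_cast; ring]
            | succ j =>
              rw [List.getD_cons_succ, mprod_cons_none _ _ _ hm, balR_cons_rb, h5 j]
              rw [show (1 : Int) + balR cs - 1 - ((j + 1 : Nat) : Int) = balR cs - 1 - (j : Int) by push_cast; ring]
        · by_cases hd : d = '[' ∨ d = ']'
          · -- bare close
            have hm : multOf ']' cs.head? = none := by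
              rw [hcs]; rcases hd with hd | hd <;> subst hd <;> rfl
            have hinc : incOf ']' cs.head? = 1 := by
              rw [hcs]; rcases hd with hd | hd <;> subst hd <;> rfl
            rw [hbr]
            simp only [longestStepB, if_neg hc1, hcs, if_pos hd]
            first
              | rw [if_pos trivial]
              | rw [if_pos (rfl : (']' : Char) = ']')]
            try dsimp only
            refine ⟨?_, ?_, ?_, ?_, ?_, rfl⟩
            · rw [res_cons_rb, hinc, h1, hf']; ring
            · rw [mprod_cons_none _ _ _ hm, balR_cons_rb, hf',
                  show balR cs + 1 = 1 + balR cs by ring]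
            · rw [h3, balR_cons_rb]; ring
            · intro μ; rw [h4 μ, lprod_cons_none _ _ _ hm]
            · intro j
              cases j with
              | zero =>
                rw [List.getD_cons_zero, mprod_cons_none _ _ _ hm, balR_cons_rb, h2]
                rw [show (1 : Int) + balR cs - 1 - ((0 : Nat) : Int) = balR cs by push_cast; ring]
              | succ j =>
                rw [List.getD_cons_succ, mprod_cons_none _ _ _ hm, balR_cons_rb, h5 j]
                rw [show (1 : Int) + balR cs - 1 - ((j + 1 : Nat) : Int) = balR cs - 1 - (j : Int) by push_cast; ring]
          · -- numbered close
            set num := (PySem.Int.ofStr? (String.mk [d])).getD 0 with hnumdef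
            have hd1 : ¬ d = '[' := fun hh => hd (Or.inl hh)
            have hd2 : ¬ d = ']' := fun hh => hd (Or.inr hh)
            have hmult : multOf ']' cs.head? = some num := by
              rw [hcs]; simp [multOf, hd, hnumdef]
            have hinc : incOf ']' cs.head? = num := by
              rw [hcs]; simp [incOf, hd, hnumdef]
            have hnlt : ∀ b : Int, b ≤ balR cs + 1 →
                mprod b (']' :: cs) = mprod b cs := by
              intro b hb
              exact mprod_cons_some_nlt ']' cs b num hmult (by rw [balR_cons_rb]; omega)
            rw [hbr]
            simp only [longestStepB, if_neg hc1, hcs, if_neg hd]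
            first
              | rw [if_pos trivial]
              | rw [if_pos (rfl : (']' : Char) = ']')]
            try dsimp only
            refine ⟨?_, ?_, ?_, ?_, ?_, rfl⟩
            · rw [res_cons_rb, hinc, h1, hf']; ring
            · rw [balR_cons_rb, hnlt _ (by omega), hf',
                  show balR cs + 1 = 1 + balR cs by ring]
            · rw [h3, balR_cons_rb]; ring
            · intro μ
              rw [PySem.Dict.getD_insert, lprod_cons_some _ _ _ _ hmult, balR_cons_rb, h3]
              by_cases hμ : μ = balR cs + 1
              · rw [if_pos (by omega : 1 + balR cs = μ), if_pos (by omega : μ = balR cs + 1), hμ,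
                    h4 (balR cs + 1), ← hnumdef]
                ring
              · rw [if_neg (by omega : ¬ 1 + balR cs = μ), if_neg (by omega : ¬ μ = balR cs + 1),
                    h4 μ]
                ring
            · intro j
              cases j with
              | zero =>
                rw [List.getD_cons_zero, balR_cons_rb,
                    show (1 : Int) + balR cs - 1 - ((0 : Nat) : Int) = balR cs by push_cast; ring,
                    hnlt _ (by omega), h2]
              | succ j =>
                rw [List.getD_cons_succ, balR_cons_rb,
                    show (1 : Int) + balR cs - 1 - ((j + 1 : Nat) : Int) = balR cs - 1 - (j : Int) by push_cast; ring,
                    hnlt _ (by omega), h5 j]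
      · -- other character
        have hm : multOf c cs.head? = none := multOf_none_of_ne _ _ hc2
        have hbal : balR (c :: cs) = balR cs := balR_cons_other c cs hc1 hc2
        rw [hbr]
        simp only [longestStepB, if_neg hc1, if_neg hc2]
        refine ⟨?_, ?_, ?_, ?_, ?_, rfl⟩
        · rw [res_cons_not _ _ hc2, h1]
        · rw [mprod_cons_none _ _ _ hm, hbal, h2]
        · rw [h3, hbal]
        · intro μ; rw [h4 μ, lprod_cons_none _ _ _ hm]
        · intro j; rw [mprod_cons_none _ _ _ hm, hbal, h5 j]

-- A's inner rescaling loop scales the suffix of the array from index t on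
theorem scale_fold (num : Int) :
    ∀ (m t : Nat) (d : List Int), d.length - t = m →
      (PySem.List.pyRange (t : Int) (d.length : Int) 1).foldl
        (fun dd j => PySem.List.pySetD dd j (num * PySem.List.pyGetD dd j 0)) d
      = d.take t ++ (d.drop t).map (fun x => num * x) := by
  intro m
  induction m with
  | zero =>
    intro t d h
    have hle : d.length ≤ t := by omega
    rw [PySem.List.pyRange_one_eq_nil (by exact_mod_cast hle)]
    simp [List.take_of_length_le hle, List.drop_eq_nil_of_le hle]
  | succ m ih =>
    intro t d h
    have ht : t < d.length := by omega
    rw [PySem.List.pyRange_one_cons (by exact_mod_cast ht)]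
    simp only [List.foldl_cons]
    have hset : PySem.List.pySetD d (t : Int) (num * PySem.List.pyGetD d (t : Int) 0)
        = d.set t (num * d[t]) := by
      rw [PySem.List.pyGetD_natCast, List.getD_eq_getElem d 0 ht, PySem.List.pySetD_natCast]
    rw [hset]
    have hlen : (d.set t (num * d[t])).length = d.length := by simp
    rw [show ((t : Int) + 1) = (((t + 1 : Nat)) : Int) by push_cast; ring, ← hlen,
        ih (t + 1) (d.set t (num * d[t])) (by simp; omega)]
    have hu : (d.take t).length = t := by simp [ht.le]
    rw [List.set_eq_take_append_cons_drop, if_pos ht, List.take_append, List.drop_append, hu]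
    rw [List.take_of_length_le (by omega : (d.take t).length ≤ t + 1),
        List.drop_eq_nil_of_le (by omega : (d.take t).length ≤ t + 1),
        show t + 1 - t = 1 by omega]
    simp
    rw [← List.getElem_cons_drop (show t < (List.map (fun x => num * x) d).length by simpa using ht)]
    simp

-- bridge: A's pyRange fold is arec (for any stack contents)
theorem foldA_bridge (l : List Char) :
    ∀ (m k : Nat) (stack : List Int) (dep : Int) (depth : List Int),
      l.length - k = m → k ≤ l.length → 0 ≤ dep → dep ≤ depth.length → preT dep (l.drop k) →
      ∃ stk', (PySem.List.pyRange (k : Int) (l.length : Int) 1).foldl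
                (longestStepA l (l.length : Int)) (stack, dep, depth)
              = (stk', arec (dep, depth) (l.drop k)) := by
  intro m
  induction m with
  | zero =>
    intro k stack dep depth hm hk _ _ _
    have hkl : l.length ≤ k := by omega
    rw [PySem.List.pyRange_one_eq_nil (by exact_mod_cast hkl), List.drop_eq_nil_of_le hkl]
    exact ⟨stack, rfl⟩
  | succ m ih =>
    intro k stack dep depth hm hk hd0 hdl hpre
    have hklt : k < l.length := by omega
    have hdropk : l.drop k = l[k] :: l.drop (k + 1) := (List.getElem_cons_drop hklt).symm
    rw [PySem.List.pyRange_one_cons (by exact_mod_cast hklt)]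
    simp only [List.foldl_cons]
    have hget : PySem.List.pyGet? l (k : Int) = some l[k] := by
      rw [PySem.List.pyGet?_natCast, List.getElem?_eq_getElem hklt]
    have hnxt : PySem.List.pyGet? l ((k : Int) + 1) = l[k + 1]? := by
      rw [show ((k : Int) + 1) = ((k + 1 : Nat) : Int) by push_cast; ring,
          PySem.List.pyGet?_natCast]
    have hhead : (l.drop (k + 1)).head? = l[k + 1]? := List.head?_drop
    have hcast1 : ((k : Int) + 1) = ((k + 1 : Nat) : Int) := by push_cast; ring
    rw [hdropk] at hpre
    rw [hdropk]
    by_cases hc1 : l[k] = '['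
    · rw [hc1] at hpre
      have hpre' : preT (dep + 1) (l.drop (k + 1)) := by
        simpa only [preT, reduceIte] using hpre
      have hstep : longestStepA l (l.length : Int) (stack, dep, depth) (k : Int)
          = (stack ++ [(k : Int)], dep + 1, depth ++ [0]) := by
        simp [longestStepA, hget, hc1]
      obtain ⟨stk', hE⟩ := ih (k + 1) (stack ++ [(k : Int)]) (dep + 1) (depth ++ [0])
        (by omega) (by omega) (by omega) (by simp; omega) hpre'
      refine ⟨stk', ?_⟩
      rw [hstep, hcast1, hE, hc1]
      simp [arec]
    · by_cases hc2 : l[k] = ']'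
      · rw [hc2] at hpre
        have hpre' : (1 ≤ dep) ∧ preT (dep - 1) (l.drop (k + 1)) := by
          simpa only [preT, reduceIte] using hpre
        have hsetconv : PySem.List.pySetD depth (dep - 1) (PySem.List.pyGetD depth (dep - 1) 0 + 1)
            = depth.set (dep - 1).toNat (depth.getD (dep - 1).toNat 0 + 1) := by
          have h0 : (0:Int) ≤ dep - 1 := by omega
          simp only [PySem.List.pyGetD_of_nonneg _ _ h0, PySem.List.pySetD_of_nonneg _ _ h0]
        rcases hnk : l[k + 1]? with _ | d2
        · -- this ']' is the last character
          have hkeq : l.length ≤ k + 1 := by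
            simpa using List.getElem?_eq_none_iff.mp hnk
          have hstep : longestStepA l (l.length : Int) (stack, dep, depth) (k : Int)
              = (stack.dropLast, dep - 1,
                 PySem.List.pySetD depth (dep - 1) (PySem.List.pyGetD depth (dep - 1) 0 + 1)) := by
            simp only [longestStepA, hget, hnxt, hnk]
            split_ifs with h1 h2 h3
            · exfalso; revert h1; simp
            · rfl
            · exact absurd ⟨(by omega : (k : Int) = (l.length : Int) - 1), hc2⟩ h2
            · exact absurd ⟨(by omega : (k : Int) = (l.length : Int) - 1), hc2⟩ h2
          obtain ⟨stk', hE⟩ := ih (k + 1) stack.dropLast (dep - 1)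
            (depth.set (dep - 1).toNat (depth.getD (dep - 1).toNat 0 + 1))
            (by omega) (by omega) (by omega) (by simp; omega) hpre'.2
          refine ⟨stk', ?_⟩
          rw [hstep, hsetconv, hcast1, hE, hc2]
          simp [arec, List.head?_drop, hnk]
        · have hk1lt : k + 1 < l.length := (List.getElem?_eq_some_iff.mp hnk).1
          by_cases hd : d2 = '[' ∨ d2 = ']'
          · -- bare close
            have hstep : longestStepA l (l.length : Int) (stack, dep, depth) (k : Int)
                = (stack.dropLast, dep - 1,
                   PySem.List.pySetD depth (dep - 1) (PySem.List.pyGetD depth (dep - 1) 0 + 1)) := by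
              rcases hd with hd | hd <;> subst hd <;>
                simp [longestStepA, hget, hnxt, hnk, hc2,
                      show (k : Int) < (l.length : Int) - 1 by omega]
            obtain ⟨stk', hE⟩ := ih (k + 1) stack.dropLast (dep - 1)
              (depth.set (dep - 1).toNat (depth.getD (dep - 1).toNat 0 + 1))
              (by omega) (by omega) (by omega) (by simp; omega) hpre'.2
            refine ⟨stk', ?_⟩
            rw [hstep, hsetconv, hcast1, hE, hc2]
            rcases hd with hd | hd <;> subst hd <;>
              simp [arec, List.head?_drop, hnk]
          · -- numbered close
            have hd1 : ¬ d2 = '[' := fun hh => hd (Or.inl hh)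
            have hd2 : ¬ d2 = ']' := fun hh => hd (Or.inr hh)
            set num := (PySem.Int.ofStr? (String.mk [d2])).getD 0 with hnumdef
            set d1 := depth.set (dep - 1).toNat (depth.getD (dep - 1).toNat 0 + num) with hd1def
            have hsetconv2 : PySem.List.pySetD depth (dep - 1) (PySem.List.pyGetD depth (dep - 1) 0 + num)
                = d1 := by
              have h0 : (0:Int) ≤ dep - 1 := by omega
              rw [hd1def]
              simp only [PySem.List.pyGetD_of_nonneg _ _ h0, PySem.List.pySetD_of_nonneg _ _ h0]
            have hld1 : d1.length = depth.length := by rw [hd1def]; simp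
            have hscale := scale_fold num (d1.length - dep.toNat) dep.toNat d1 rfl
            have hstep : longestStepA l (l.length : Int) (stack, dep, depth) (k : Int)
                = (stack, dep - 1, d1.take dep.toNat ++ (d1.drop dep.toNat).map (fun x => num * x)) := by
              simp only [longestStepA, hget, hnxt, hnk]
              split_ifs with h1 h2 h3
              · exfalso; revert h1; simp [hd1, hd2]
              · exact absurd h2.1 (by omega)
              · simp only [Option.getD_some, ← hnumdef, hsetconv2]
                rw [show dep - 1 + 1 = ((dep.toNat : Int)) by omega, hscale]
              · exfalso; revert h3; simp [hc2, hd1, hd2]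
            obtain ⟨stk', hE⟩ := ih (k + 1) stack (dep - 1)
              (d1.take dep.toNat ++ (d1.drop dep.toNat).map (fun x => num * x))
              (by omega) (by omega) (by omega)
              (by simp only [List.length_append, List.length_take, List.length_map,
                    List.length_drop, hld1]; omega) hpre'.2
            refine ⟨stk', ?_⟩
            rw [hstep, hcast1, hE, hc2]
            have hinc : incOf ']' (some d2) = num := by
              rw [hnumdef]
              simp [incOf, hd1, hd2]
            simp only [arec, List.head?_drop, hnk]
            split_ifs with h1 h2
            · exact absurd h1 (by decide)
            · exfalso; revert h2; simp [hd1, hd2]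
            · rw [hinc, ← hd1def]
      · -- any other character
        have hpre' : preT dep (l.drop (k + 1)) := by
          simpa only [preT, if_neg hc1, if_neg hc2] using hpre
        have hstep : longestStepA l (l.length : Int) (stack, dep, depth) (k : Int)
            = (stack, dep, depth) := by
          simp [longestStepA, hget, hc1, hc2]
        obtain ⟨stk', hE⟩ := ih (k + 1) stack dep depth
          (by omega) (by omega) hd0 hdl hpre'
        refine ⟨stk', ?_⟩
        rw [hstep, hcast1, hE]
        simp [arec, hc1, hc2]

-- Pre_ gives depth-underflow-freedom
theorem pre_to_preT (l : List Char) :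
    ∀ (D : Int), 0 ≤ D →
      (∀ i ∈ List.range l.length, l.getD i ' ' = ']' →
        ((l.take i).count ']' : Int) - ((l.take i).count '[' : Int) < D) →
      preT D l := by
  induction l with
  | nil => intro D _ _; trivial
  | cons c cs ih =>
    intro D hD h
    have hshift : ∀ j ∈ List.range cs.length, cs.getD j ' ' = ']' →
        (((c :: cs.take j).count ']' : Int)) - (((c :: cs.take j).count '[' : Int)) < D := by
      intro j hj hg
      have hj' : j + 1 ∈ List.range (c :: cs).length := by
        simp only [List.mem_range, List.length_cons] at hj ⊢; omega
      have := h (j + 1) hj' (by simpa using hg)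
      simpa using this
    by_cases h1 : c = '['
    · subst h1
      simp only [preT, reduceIte]
      apply ih (D + 1) (by omega)
      intro j hj hg
      have := hshift j hj hg
      simp at this
      omega
    · by_cases h2 : c = ']'
      · subst h2
        simp only [preT, reduceIte]
        constructor
        · have h0 := h 0 (by simp) (by simp)
          simp at h0
          omega
        · apply ih (D - 1) ?_ ?_
          · have h0 := h 0 (by simp) (by simp)
            simp at h0
            omega
          · intro j hj hg
            have := hshift j hj hg
            simp at this
            omega
      · simp only [preT, if_neg h1, if_neg h2]
        apply ih D hD
        intro j hj hg
        have := hshift j hj hg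
        simp [h1, h2] at this
        omega

-- ===== VERDICT (by name: the statement is the Claim_ definition above) =====
theorem longest_spec : Claim_equal_longest := by
  unfold Claim_equal_longest
  intro s _ hpre
  unfold Spec_longest
  have hB : longest_alt s = res s.toList := by
    rw [longest_alt, foldl_reverse_brec]
    exact (brec_inv s.toList).1
  have hpreT : preT 0 s.toList := by
    apply pre_to_preT s.toList 0 le_rfl
    intro i hi hg
    have h := (hpre i hi hg).1
    omega
  by_cases hnil : s.toList = []
  · simp only [longest]
    rw [if_pos hnil, hB, hnil]
    rfl
  · obtain ⟨stk, hfold⟩ := foldA_bridge s.toList s.toList.length 0 [] 0 []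
      (by omega) (by omega) le_rfl (by simp) (by simpa using hpreT)
    simp only [Nat.cast_zero, List.drop_zero] at hfold
    simp only [longest]
    rw [if_neg hnil, hfold]
    show (arec (0, []) s.toList).2.sum = longest_alt s
    rw [arec_sum s.toList 0 [] hpreT le_rfl (by simp), hB]
    simp [wsum]
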